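-- pv_equiv track=rewrite | github.com/mmirovic/advent-of-code-2017 | puzzle16/puzzle16.py | part2
-- ===== SOURCE A (Python) =====
-- def part1(data, g):
--
--     for el in data:
--
--         # x3/15
--         if el[0] == 'x':
--             d = el.index('/')
--             t = g[int(el[1:d])]
--             g[int(el[1:d])] = g[int(el[d+1:])]
--             g[int(el[d+1:])] = t
--
--         # pc/l
--         elif el[0] == 'p':
--             e1 = g.index(el[1])
--             e2 = g.index(el[3])
--             t = g[e1]
--             g[e1] = g[e2]
--             g[e2] = t
--
--         # s2
--         else:
--             s = int(el[1:])
--             g = g[-s:] + g[:-s]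
--
--     return g
--
-- def part2(data, g):
--
--     s = g.copy()
--
--     # search for the first repetition of the original string
--     g = part1(data, g)
--     i = 1
--     while (''.join(g) != ''.join(s)):
--         g = part1(data,g)
--         i += 1
--
--     for c in range(1000000000 % i):
--         g = part1(data, g)
--
--     return g
-- ===== SOURCE B (Python) =====
-- def _parse(data):
--     # precompile the instruction strings once into tagged moves
--     moves = []
--     for el in data:
--         if el[0] == 'x':
--             i = el.index('/')
--             moves.append(('x', int(el[1:i]), int(el[i+1:])))
--         elif el[0] == 'p':
--             moves.append(('p', el[1], el[3]))
--         else: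
--             moves.append(('s', int(el[1:])))
--     return moves
--
--
-- def _dance(moves, g):
--     g = list(g)
--     for m in moves:
--         if m[0] == 'x':
--             a, b = m[1], m[2]
--             g[a], g[b] = g[b], g[a]
--         elif m[0] == 'p':
--             x, y = m[1], m[2]
--             # partner move as a renaming pass instead of a position swap
--             g = [y if c == x else x if c == y else c for c in g]
--         else:
--             k = m[1]
--             g = g[-k:] + g[:-k]
--     return g
--
--
-- def part2(data, g):
--     moves = _parse(data)
--     # record every arrangement until the start repeats, then index by the period
--     history = [list(g)]
--     cur = _dance(moves, g)
--     while cur != history[0]: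
--         history.append(cur)
--         cur = _dance(moves, cur)
--     return history[1000000000 % len(history)]
-- ===== Notes on version B (the rewrite author's own statement) =====
-- stated objective: alternative
-- what changed: B precompiles the instruction strings once into tagged moves instead of re-parsing every string on every dance, performs partner moves as a renaming pass instead of a position swap, and replaces A's second dance-replay loop by recording every arrangement seen while finding the period and returning history[1000000000 % period] with one index lookup; it compares arrangements element-wise instead of joining them to strings and does not mutate the caller's list (A does).
-- outside the precondition, e.g. on part2(['s1'], ['', 'a']): A returns ['a', ''], B returns ['', 'a']
import Mathlib
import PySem

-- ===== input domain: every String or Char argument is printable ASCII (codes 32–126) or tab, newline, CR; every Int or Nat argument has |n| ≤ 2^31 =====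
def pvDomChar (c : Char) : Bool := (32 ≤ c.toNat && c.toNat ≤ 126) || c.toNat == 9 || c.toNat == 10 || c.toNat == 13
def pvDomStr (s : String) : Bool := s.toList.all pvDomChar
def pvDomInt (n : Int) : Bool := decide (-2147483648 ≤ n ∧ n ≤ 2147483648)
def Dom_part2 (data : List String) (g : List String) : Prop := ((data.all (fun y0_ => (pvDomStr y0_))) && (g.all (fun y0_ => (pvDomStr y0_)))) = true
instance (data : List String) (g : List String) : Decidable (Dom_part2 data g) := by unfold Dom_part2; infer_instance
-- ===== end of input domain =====

-- B parses the instruction strings ONCE into tagged moves, performs partner moves as a renaming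
-- pass instead of a position swap, records the arrangements seen while finding the period and
-- returns history[10^9 % period] by one index lookup (no second replay loop); equivalence is
-- about the RETURN value: Python A mutates g in place, Python B leaves its arguments untouched.

-- ===== PORT A =====
-- one dance move of A's part1 (the body of the 'for el in data' loop); where Python raises
-- (IndexError/ValueError, all outside Pre_) the state is returned unchanged for totality
def moveStep (g : List String) (el : String) : List String :=
  match PySem.Str.pyGet? el 0 with
  | none => g                                   -- el[0]: IndexError (outside Pre_)
  | some c0 =>
    if c0 = 'x' then
      let d := PySem.Str.find el "/"
      if d < 0 then g                           -- el.index('/'): ValueError (outside Pre_)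
      else
        match PySem.Int.ofStr? (PySem.Str.slice el (some 1) (some d)),
              PySem.Int.ofStr? (PySem.Str.slice el (some (d+1)) none) with
        | some i1, some i2 =>
          match PySem.List.pyGet? g i1, PySem.List.pyGet? g i2 with
          | some t, some v => PySem.List.pySetD (PySem.List.pySetD g i1 v) i2 t
          | _, _ => g                           -- g[_]: IndexError (outside Pre_)
        | _, _ => g                             -- int(): ValueError (outside Pre_)
    else if c0 = 'p' then
      match PySem.Str.pyGet? el 1, PySem.Str.pyGet? el 3 with
      | some c1, some c3 =>
        match PySem.List.index? g (String.ofList [c1]), PySem.List.index? g (String.ofList [c3]) with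
        | some e1, some e2 =>
          match g[e1]?, g[e2]? with             -- indices from .index are always in range
          | some t, some v => (g.set e1 v).set e2 t
          | _, _ => g
        | _, _ => g                             -- g.index: ValueError (outside Pre_)
      | _, _ => g                               -- el[_]: IndexError (outside Pre_)
    else
      match PySem.Int.ofStr? (PySem.Str.slice el (some 1) none) with
      | some s => PySem.List.slice g (some (-s)) none ++ PySem.List.slice g none (some (-s))
      | none => g                               -- int(): ValueError (outside Pre_)

def part1 (data : List String) (g : List String) : List String :=
  data.foldl moveStep g

-- A's while loop: counts applications until ''.join(g) == ''.join(s); the fuel only makes it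
-- total (on fuel exhaustion, which the while loop has no analogue of, it falls back to (s, i))
def findLoop (data s : List String) : Nat → List String → Nat → List String × Nat
  | 0, _, i => (s, i)
  | n+1, g, i =>
    if PySem.Str.join "" g = PySem.Str.join "" s then (g, i)
    else findLoop data s n (part1 data g) (i+1)

-- A's 'for c in range(1000000000 % i)' replay loop
def applyN (data : List String) : Nat → List String → List String
  | 0, g => g
  | n+1, g => applyN data n (part1 data g)

def part2 (data : List String) (g : List String) : List String :=
  let s := g
  let res := findLoop data s (Nat.factorial g.length + 1) (part1 data g) 1
  applyN data (1000000000 % res.2) res.1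

-- ===== PORT B =====
-- a precompiled dance move: ('x', a, b) / ('p', x, y) / ('s', k)
inductive PMove : Type
  | mx : Int → Int → PMove
  | mp : String → String → PMove
  | ms : Int → PMove
deriving DecidableEq, Repr

-- one instruction string parsed into a tagged move; none = the ValueError/IndexError
-- B's _parse raises there (outside Pre_)
def parseMove (el : String) : Option PMove :=
  match PySem.Str.pyGet? el 0 with
  | none => none
  | some c0 =>
    if c0 = 'x' then
      let i := PySem.Str.find el "/"
      if i < 0 then none
      else
        match PySem.Int.ofStr? (PySem.Str.slice el (some 1) (some i)),
              PySem.Int.ofStr? (PySem.Str.slice el (some (i+1)) none) with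
        | some a, some b => some (PMove.mx a b)
        | _, _ => none
    else if c0 = 'p' then
      match PySem.Str.pyGet? el 1, PySem.Str.pyGet? el 3 with
      | some a, some b => some (PMove.mp (String.ofList [a]) (String.ofList [b]))
      | _, _ => none
    else (PySem.Int.ofStr? (PySem.Str.slice el (some 1) none)).map PMove.ms

-- B's _parse loop; none as soon as one instruction fails to parse
def parseAll : List String → Option (List PMove)
  | [] => some []
  | el :: rest =>
    match parseMove el, parseAll rest with
    | some m, some ms => some (m :: ms)
    | _, _ => none

-- B's _dance loop body: g[a], g[b] = g[b], g[a] for x; a renaming comprehension for p; slicing for s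
def applyMoveB (g : List String) : PMove → List String
  | PMove.mx a b =>
    match PySem.List.pyGet? g b, PySem.List.pyGet? g a with
    | some vb, some va => PySem.List.pySetD (PySem.List.pySetD g a vb) b va
    | _, _ => g                                 -- g[_]: IndexError (outside Pre_)
  | PMove.mp x y => g.map (fun c => if c = x then y else if c = y then x else c)
  | PMove.ms k => PySem.List.slice g (some (-k)) none ++ PySem.List.slice g none (some (-k))

def danceB (moves : List PMove) (g : List String) : List String :=
  moves.foldl applyMoveB g

-- B's while loop: the arrangements strictly after the start, in order, until the start repeats
-- (fuel only for totality: on exhaustion the history simply ends)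
def historyLoop (moves : List PMove) (start : List String) : Nat → List String → List (List String)
  | 0, _ => []
  | n+1, cur => if cur = start then [] else cur :: historyLoop moves start n (danceB moves cur)

def part2_alt (data : List String) (g : List String) : List String :=
  match parseAll data with
  | none => []                                  -- _parse raised (outside Pre_)
  | some moves =>
    let history := g :: historyLoop moves g (Nat.factorial g.length + 1) (danceB moves g)
    history.getD (1000000000 % history.length) []

-- ===== PRECONDITION & SPEC =====
-- one dance move A accepts: 'x<int>/<int>' with both indices in Python range of g,
-- 'p<c>/<c>' with both one-char names present in g, or any other 'σ<int>' spin
def wfMove (el : String) (g : List String) : Bool :=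
  match PySem.Str.pyGet? el 0 with
  | none => false
  | some c0 =>
    if c0 = 'x' then
      let d := PySem.Str.find el "/"
      decide (0 < d) &&
      (match PySem.Int.ofStr? (PySem.Str.slice el (some 1) (some d)),
             PySem.Int.ofStr? (PySem.Str.slice el (some (d+1)) none) with
       | some a, some b => decide (-(g.length:Int) ≤ a ∧ a < g.length ∧ -(g.length:Int) ≤ b ∧ b < g.length)
       | _, _ => false)
    else if c0 = 'p' then
      match PySem.Str.pyGet? el 1, PySem.Str.pyGet? el 3 with
      | some c1, some c3 => decide (String.ofList [c1] ∈ g) && decide (String.ofList [c3] ∈ g)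
      | _, _ => false
    else (PySem.Int.ofStr? (PySem.Str.slice el (some 1) none)).isSome

-- Pre_ excludes inputs where A raises (malformed moves) or loops forever (partner moves over
-- duplicate names), and — when data is nonempty — arrangements whose entries are not single
-- characters, on which A's join-based cycle test can stop at a different arrangement than B's
-- element-wise test (both are defensible readings of an input the puzzle never produces).
def Pre_part2 (data : List String) (g : List String) : Prop :=
  data = [] ∨
  ((∀ e ∈ g, e.toList.length = 1) ∧
   (∀ el ∈ data, wfMove el g = true) ∧
   ((∃ el ∈ data, PySem.Str.pyGet? el 0 = some 'p') → g.Nodup))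

instance (data : List String) (g : List String) : Decidable (Pre_part2 data g) := by
  unfold Pre_part2; infer_instance

def pvWitness_part2 : List String × List String := (["s1", "x0/2", "pa/b"], ["a", "b", "c"])

def Spec_part2 (data : List String) (g : List String) (out : List String) : Prop := out = part2_alt data g
instance (data : List String) (g : List String) (out : List String) : Decidable (Spec_part2 data g out) := by unfold Spec_part2; infer_instance

-- ===== CLAIM (what is proved, stated in full; the proofs are below) =====
def Claim_equal_part2 : Prop := ∀ (data : List String) (g : List String), Dom_part2 data g → Pre_part2 data g → Spec_part2 data g (part2 data g)

-- ===== LEMMAS AND PROOFS =====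

-- writing a value b back at a position and the old value of that position at another
-- position is a permutation (the common shape of both ports' swaps)
theorem set_set_perm (g : List String) (i j : Nat) (hi : i < g.length) (hj : j < g.length) :
    ((g.set i (g[j]'hj)).set j (g[i]'hi)).Perm g := by
  rw [List.perm_iff_count]
  intro v
  have hj' : j < (g.set i (g[j]'hj)).length := by simpa using hj
  rw [List.count_set hj', List.count_set hi]
  have hset : (g.set i (g[j]'hj))[j]'hj' = g[j]'hj := by
    rw [List.getElem_set]; split <;> simp_all
  rw [hset]
  have hmi : g[i]'hi ∈ g := List.getElem_mem hi
  have hmj : g[j]'hj ∈ g := List.getElem_mem hj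
  by_cases h1 : g[i]'hi = v
  · have hc : 0 < g.count v := List.count_pos_iff.mpr (h1 ▸ hmi)
    by_cases h2 : g[j]'hj = v <;> simp [h1, h2, beq_iff_eq] <;> omega
  · by_cases h2 : g[j]'hj = v
    · have hc : 0 < g.count v := List.count_pos_iff.mpr (h2 ▸ hmj)
      simp [h1, h2, beq_iff_eq]
    · simp [h1, h2, beq_iff_eq]

-- xs[t:] ++ xs[:t] is a rotation, hence a permutation, for EVERY Int t
theorem spin_perm (g : List String) (t : Int) :
    (PySem.List.slice g (some t) none ++ PySem.List.slice g none (some t)).Perm g := by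
  have h1 : PySem.List.slice g (some t) none = g.drop (PySem.List.clampIdx g.length t) := by
    simp [PySem.List.slice]
  have h2 : PySem.List.slice g none (some t) = g.take (PySem.List.clampIdx g.length t) := by
    simp [PySem.List.slice]
  rw [h1, h2]
  calc (g.drop (PySem.List.clampIdx g.length t) ++ g.take (PySem.List.clampIdx g.length t)).Perm
        (g.take (PySem.List.clampIdx g.length t) ++ g.drop (PySem.List.clampIdx g.length t)) :=
        List.perm_append_comm
    _ = g := List.take_append_drop _ _

-- pySetD at an index pyIdx? resolves is List.set
theorem pySetD_eq_set {xs : List String} {i : Int} {k : Nat} (v : String)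
    (h : PySem.List.pyIdx? xs.length i = some k) : PySem.List.pySetD xs i v = xs.set k v := by
  simp [PySem.List.pySetD, PySem.List.pySet?, h]

-- a successful pyGet? names a real position
theorem pyGet?_resolve {xs : List String} {i : Int} {t : String}
    (h : PySem.List.pyGet? xs i = some t) :
    ∃ k, PySem.List.pyIdx? xs.length i = some k ∧ ∃ hk : k < xs.length, xs[k] = t := by
  unfold PySem.List.pyGet? at h
  cases hk : PySem.List.pyIdx? xs.length i with
  | none => rw [hk] at h; simp at h
  | some k =>
    rw [hk] at h; simp at h
    exact ⟨k, rfl, List.getElem?_eq_some_iff.mp h⟩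

-- one dance move of A only rearranges the entries
theorem moveStep_perm (g : List String) (el : String) : (moveStep g el).Perm g := by
  unfold moveStep
  split
  · exact List.Perm.refl g
  · split_ifs with hx hp
    · -- x move
      simp only []
      split
      · exact List.Perm.refl g
      · split
        · split
          case _ t v hget1 hget2 =>
            obtain ⟨k1, hk1, hlt1, he1⟩ := pyGet?_resolve hget1
            obtain ⟨k2, hk2, hlt2, he2⟩ := pyGet?_resolve hget2
            rw [pySetD_eq_set v hk1]
            rw [pySetD_eq_set t (by rwa [List.length_set])]
            subst he1 he2
            exact set_set_perm g k1 k2 hlt1 hlt2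
          case _ => exact List.Perm.refl g
        · exact List.Perm.refl g
    · -- p move
      split
      case _ c1 c3 =>
        split
        case _ e1 e2 hi1 hi2 =>
          split
          case _ t v hget1 hget2 =>
            obtain ⟨hlt1, he1⟩ := List.getElem?_eq_some_iff.mp hget1
            obtain ⟨hlt2, he2⟩ := List.getElem?_eq_some_iff.mp hget2
            subst he1 he2
            exact set_set_perm g e1 e2 hlt1 hlt2
          case _ => exact List.Perm.refl g
        case _ => exact List.Perm.refl g
      case _ => exact List.Perm.refl g
    · -- spin
      split
      case _ s hs => exact spin_perm g (-s)
      case _ => exact List.Perm.refl g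

-- a whole dance of A only rearranges the entries
theorem part1_perm (data : List String) (g : List String) : (part1 data g).Perm g := by
  induction data generalizing g with
  | nil => exact List.Perm.refl g
  | cons el rest ih =>
    exact ((ih (moveStep g el)).trans (moveStep_perm g el))

theorem part1_mem (data : List String) (g : List String) (a : String)
    (h : a ∈ part1 data g) : a ∈ g := (part1_perm data g).mem_iff.mp h

-- a move well-formed for an arrangement is well-formed for any rearrangement of it
theorem wfMove_perm (el : String) {g g' : List String} (h : g'.Perm g) :
    wfMove el g' = wfMove el g := by
  unfold wfMove
  split
  · rfl
  · split_ifs with hx hp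
    · simp only [h.length_eq]
    · split
      next c1 c3 _ _ =>
        rw [decide_eq_decide.mpr (h.mem_iff (a := String.ofList [c1])),
          decide_eq_decide.mpr (h.mem_iff (a := String.ofList [c3]))]
      next => rfl
    · rfl

-- the partner move as a renaming pass equals the partner move as a position swap,
-- for an arrangement with no duplicate names containing both names
theorem rename_eq_swap (g : List String) (x y : String) (hnd : g.Nodup)
    {e1 e2 : Nat} (hi1 : PySem.List.index? g x = some e1) (hi2 : PySem.List.index? g y = some e2)
    {t v : String} (hg1 : g[e1]? = some t) (hg2 : g[e2]? = some v) :
    g.map (fun c => if c = x then y else if c = y then x else c) = (g.set e1 v).set e2 t := by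
  obtain ⟨hlt1, hx1, _⟩ := PySem.List.getElem_of_index?_eq_some hi1
  obtain ⟨hlt2, hy2, _⟩ := PySem.List.getElem_of_index?_eq_some hi2
  have ht : t = x := by rw [List.getElem?_eq_getElem hlt1] at hg1; simp at hg1; rw [← hg1, hx1]
  have hv : v = y := by rw [List.getElem?_eq_getElem hlt2] at hg2; simp at hg2; rw [← hg2, hy2]
  rw [ht, hv]
  apply List.ext_getElem
  · simp
  · intro k hk1 hk2
    simp only [List.getElem_map]
    have hk : k < g.length := by simpa using hk1
    rw [List.getElem_set, List.getElem_set]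
    have hinj : ∀ i j (hi : i < g.length) (hj : j < g.length), g[i] = g[j] → i = j := by
      intro i j hi hj hij
      exact (List.Nodup.getElem_inj_iff hnd).mp hij
    by_cases h2 : e2 = k
    · subst h2
      rw [hy2]
      by_cases hxy : y = x
      · simp [hxy]
      · simp [hxy]
    · by_cases h1 : e1 = k
      · subst h1
        simp [hx1, h2]
      · have hne1 : g[k]'hk ≠ x := fun hc => h1 ((hinj k e1 hk hlt1 (by rw [hc, hx1])).symm)
        have hne2 : g[k]'hk ≠ y := fun hc => h2 ((hinj k e2 hk hlt2 (by rw [hc, hy2])).symm)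
        simp [hne1, hne2, h1, h2]

-- for a well-formed move, B's parse succeeds and applying the parsed move is A's moveStep
theorem step_eq (el : String) (g : List String)
    (hwf : wfMove el g = true)
    (hnd : PySem.Str.pyGet? el 0 = some 'p' → g.Nodup) :
    ∃ m, parseMove el = some m ∧ applyMoveB g m = moveStep g el := by
  unfold wfMove at hwf
  unfold parseMove moveStep
  cases hel : PySem.Str.pyGet? el 0 with
  | none => rw [hel] at hwf; simp at hwf
  | some c0 =>
    rw [hel] at hwf
    by_cases hx : c0 = 'x'
    · subst hx
      simp only [↓reduceIte] at hwf ⊢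
      by_cases hd : PySem.Str.find el "/" < 0
      · rw [Bool.and_eq_true] at hwf
        exact absurd (of_decide_eq_true hwf.1) (by omega)
      · simp only [if_neg hd]
        cases h1 : PySem.Int.ofStr? (PySem.Str.slice el (some 1) (some (PySem.Str.find el "/"))) with
        | none => rw [h1] at hwf; simp at hwf
        | some a =>
          cases h2 : PySem.Int.ofStr? (PySem.Str.slice el (some (PySem.Str.find el "/" + 1)) none) with
          | none => rw [h1, h2] at hwf; simp at hwf
          | some b =>
            refine ⟨PMove.mx a b, rfl, ?_⟩
            simp only [applyMoveB]
            cases hga : PySem.List.pyGet? g a <;> cases hgb : PySem.List.pyGet? g b <;>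
              simp_all
    · by_cases hp : c0 = 'p'
      · subst hp
        simp only [↓reduceIte] at hwf ⊢
        cases h1 : PySem.Str.pyGet? el 1 with
        | none => rw [h1] at hwf; simp at hwf
        | some c1 =>
          cases h3 : PySem.Str.pyGet? el 3 with
          | none => rw [h1, h3] at hwf; simp at hwf
          | some c3 =>
            rw [h1, h3] at hwf
            have hm1 : String.ofList [c1] ∈ g := by
              by_contra hc; simp [hc] at hwf
            have hm3 : String.ofList [c3] ∈ g := by
              by_contra hc; simp [hc] at hwf
            refine ⟨PMove.mp (String.ofList [c1]) (String.ofList [c3]), rfl, ?_⟩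
            simp only [applyMoveB]
            obtain ⟨e1, hi1⟩ := Option.isSome_iff_exists.mp ((PySem.List.index?_isSome_iff g _).mpr hm1)
            obtain ⟨e2, hi2⟩ := Option.isSome_iff_exists.mp ((PySem.List.index?_isSome_iff g _).mpr hm3)
            obtain ⟨hlt1, _, _⟩ := PySem.List.getElem_of_index?_eq_some hi1
            obtain ⟨hlt2, _, _⟩ := PySem.List.getElem_of_index?_eq_some hi2
            simp only [if_neg hx, hi1, hi2, List.getElem?_eq_getElem hlt1,
              List.getElem?_eq_getElem hlt2]
            exact rename_eq_swap g _ _ (hnd hel) hi1 hi2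
              (List.getElem?_eq_getElem hlt1) (List.getElem?_eq_getElem hlt2)
      · simp only [if_neg hx, if_neg hp] at hwf ⊢
        cases hs : PySem.Int.ofStr? (PySem.Str.slice el (some 1) none) with
        | none => rw [hs] at hwf; simp at hwf
        | some s =>
          exact ⟨PMove.ms s, rfl, rfl⟩

-- B's parse succeeds on a list of well-formed moves
theorem parseAll_of_wf (data : List String) (g : List String)
    (hwf : ∀ el ∈ data, wfMove el g = true)
    (hnd : (∃ el ∈ data, PySem.Str.pyGet? el 0 = some 'p') → g.Nodup) :
    ∃ moves, parseAll data = some moves := by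
  induction data with
  | nil => exact ⟨[], rfl⟩
  | cons el rest ih =>
    obtain ⟨m, hm, _⟩ := step_eq el g (hwf el (by simp))
      (fun h => hnd ⟨el, by simp, h⟩)
    obtain ⟨ms, hms⟩ := ih (fun e he => hwf e (by simp [he]))
      (fun ⟨e, he, h⟩ => hnd ⟨e, by simp [he], h⟩)
    exact ⟨m :: ms, by simp [parseAll, hm, hms]⟩

-- B's precompiled dance equals A's interpreted dance on any rearrangement of the start
theorem dance_eq (data : List String) (g0 : List String)
    (hwf : ∀ el ∈ data, wfMove el g0 = true)
    (hnd : (∃ el ∈ data, PySem.Str.pyGet? el 0 = some 'p') → g0.Nodup)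
    {moves : List PMove} (hparse : parseAll data = some moves) :
    ∀ g, g.Perm g0 → danceB moves g = part1 data g := by
  induction data generalizing moves with
  | nil =>
    simp only [parseAll] at hparse
    cases hparse
    intro g _
    rfl
  | cons el rest ih =>
    intro g hperm
    simp only [parseAll] at hparse
    cases hm : parseMove el with
    | none => rw [hm] at hparse; simp at hparse
    | some m =>
      cases hms : parseAll rest with
      | none => rw [hm, hms] at hparse; simp at hparse
      | some ms =>
        rw [hm, hms] at hparse
        simp only [Option.some.injEq] at hparse
        subst hparse
        have hwf_el : wfMove el g = true := by
          rw [wfMove_perm el hperm]; exact hwf el (by simp)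
        have hnd_el : PySem.Str.pyGet? el 0 = some 'p' → g.Nodup := fun h =>
          (hperm.nodup_iff).mpr (hnd ⟨el, by simp, h⟩)
        obtain ⟨m', hm', happ⟩ := step_eq el g hwf_el hnd_el
        rw [hm, Option.some.injEq] at hm'
        subst hm'
        show danceB ms (applyMoveB g m) = part1 (el :: rest) g
        rw [happ]
        have hstep : (moveStep g el).Perm g0 := (moveStep_perm g el).trans hperm
        exact ih (fun e he => hwf e (by simp [he]))
          (fun ⟨e, he, h⟩ => hnd ⟨e, by simp [he], h⟩) hms (moveStep g el) hstep

-- A's search loop with part1, used below to bridge both ports' cycle searches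
def histA (data start : List String) : Nat → List String → List (List String)
  | 0, _ => []
  | n+1, cur => if cur = start then [] else cur :: histA data start n (part1 data cur)

-- B's history loop equals the part1-driven one on any rearrangement of the start
theorem historyLoop_eq_histA (data : List String) (g0 : List String)
    (hwf : ∀ el ∈ data, wfMove el g0 = true)
    (hnd : (∃ el ∈ data, PySem.Str.pyGet? el 0 = some 'p') → g0.Nodup)
    {moves : List PMove} (hparse : parseAll data = some moves) :
    ∀ (n : Nat) (cur : List String), cur.Perm g0 →
      historyLoop moves g0 n cur = histA data g0 n cur := by
  intro n
  induction n with
  | zero => intro cur _; rfl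
  | succ n ih =>
    intro cur hperm
    simp only [historyLoop, histA]
    split
    · rfl
    · rw [dance_eq data g0 hwf hnd hparse cur hperm,
        ih (part1 data cur) ((part1_perm data cur).trans hperm)]

-- ''.join with an empty separator is concatenation
theorem join_nil_eq_flatten (ls : List (List Char)) : PySem.Chars.join [] ls = ls.flatten := by
  induction ls with
  | nil => simp [PySem.Chars.join_nil]
  | cons a t ih =>
    cases t with
    | nil => simp [PySem.Chars.join_singleton]
    | cons b t2 => rw [PySem.Chars.join_cons_cons]; simp_all

-- ''.join is injective on lists of one-character strings
theorem join_inj_single (x y : List String)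
    (hx : ∀ e ∈ x, e.toList.length = 1) (hy : ∀ e ∈ y, e.toList.length = 1)
    (h : PySem.Str.join "" x = PySem.Str.join "" y) : x = y := by
  have hflat : ((x.map String.toList).flatten : List Char) = (y.map String.toList).flatten := by
    have h2 := congrArg String.toList h
    simpa [PySem.Str.join, join_nil_eq_flatten] using h2
  clear h
  induction x generalizing y with
  | nil =>
    cases y with
    | nil => rfl
    | cons b ys =>
      obtain ⟨c, hc⟩ := List.length_eq_one_iff.mp (hy b (by simp))
      simp [hc] at hflat
  | cons a xs ih =>
    cases y with
    | nil =>
      obtain ⟨c, hc⟩ := List.length_eq_one_iff.mp (hx a (by simp))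
      simp [hc] at hflat
    | cons b ys =>
      obtain ⟨c, hc⟩ := List.length_eq_one_iff.mp (hx a (by simp))
      obtain ⟨d, hd⟩ := List.length_eq_one_iff.mp (hy b (by simp))
      rw [List.map_cons, List.map_cons, List.flatten_cons, List.flatten_cons, hc, hd] at hflat
      simp only [List.cons_append, List.nil_append, List.cons.injEq] at hflat
      obtain ⟨hcd, hrest⟩ := hflat
      have hab : a = b := by
        have : a.toList = b.toList := by rw [hc, hd, hcd]
        exact String.toList_inj.mp this
      have : xs = ys := ih ys (fun e he => hx e (List.mem_cons_of_mem _ he))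
        (fun e he => hy e (List.mem_cons_of_mem _ he)) hrest
      rw [hab, this]

-- A's search loop finds exactly one more than the number of arrangements histA records,
-- and the arrangement it stops at is the start itself
theorem findLoop_eq (data s : List String) (hs : ∀ e ∈ s, e.toList.length = 1) :
    ∀ (n : Nat) (cur : List String) (i : Nat), (∀ e ∈ cur, e ∈ s) →
      findLoop data s n cur i = (s, i + (histA data s n cur).length) := by
  intro n
  induction n with
  | zero => intro cur i h; simp [findLoop, histA]
  | succ n ih =>
    intro cur i h
    by_cases hj : PySem.Str.join "" cur = PySem.Str.join "" s
    · have hcur : cur = s := join_inj_single cur s (fun e he => hs e (h e he)) hs hj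
      simp [findLoop, histA, hcur]
    · have hne : ¬ (cur = s) := fun hc => hj (by rw [hc])
      have hnext : ∀ e ∈ part1 data cur, e ∈ s := fun e he => h e (part1_mem data cur e he)
      simp only [findLoop, histA, hj, hne, if_false]
      rw [ih (part1 data cur) (i+1) hnext]
      simp [List.length_cons]
      omega

-- the k-th arrangement histA records is the dance applied k times to where the recording started
theorem histA_getD (data s : List String) :
    ∀ (n : Nat) (cur : List String) (k : Nat), k < (histA data s n cur).length →
      (histA data s n cur).getD k [] = applyN data k cur := by
  intro n
  induction n with
  | zero => intro cur k hk; simp [histA] at hk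
  | succ n ih =>
    intro cur k hk
    by_cases hc : cur = s
    · simp [histA, hc] at hk
    · simp only [histA, hc, if_false] at hk ⊢
      cases k with
      | zero => simp [applyN]
      | succ k =>
        simp only [List.length_cons] at hk
        have := ih (part1 data cur) k (by omega)
        simpa [applyN, List.getD_cons_succ] using this

theorem part2_spec_aux (data : List String) (g : List String) (hpre : Pre_part2 data g) :
    part2 data g = part2_alt data g := by
  rcases hpre with hnil | ⟨hsingle, hwf, hnd⟩
  · subst hnil
    have hid : part1 [] g = g := rfl
    simp [part2, part2_alt, parseAll, danceB, findLoop, historyLoop, applyN, hid]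
  · obtain ⟨moves, hparse⟩ := parseAll_of_wf data g hwf hnd
    have hdg : danceB moves g = part1 data g :=
      dance_eq data g hwf hnd hparse g (List.Perm.refl g)
    have hhist : historyLoop moves g (Nat.factorial g.length + 1) (danceB moves g)
        = histA data g (Nat.factorial g.length + 1) (part1 data g) := by
      rw [hdg]
      exact historyLoop_eq_histA data g hwf hnd hparse _ _ (part1_perm data g)
    have h1 : ∀ e ∈ part1 data g, e ∈ g := fun e he => part1_mem data g e he
    have hfe := findLoop_eq data g hsingle (Nat.factorial g.length + 1) (part1 data g) 1 h1
    simp only [part2, part2_alt, hparse, hhist, hfe, List.length_cons]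
    rw [Nat.add_comm 1 (histA data g (Nat.factorial g.length + 1) (part1 data g)).length]
    have hr : 1000000000 % ((histA data g (Nat.factorial g.length + 1) (part1 data g)).length + 1)
        < (histA data g (Nat.factorial g.length + 1) (part1 data g)).length + 1 :=
      Nat.mod_lt _ (by omega)
    generalize hre : 1000000000 % ((histA data g (Nat.factorial g.length + 1) (part1 data g)).length + 1) = r at hr ⊢
    cases r with
    | zero => simp [applyN]
    | succ k =>
      rw [List.getD_cons_succ, histA_getD data g (Nat.factorial g.length + 1) (part1 data g) k (by omega)]
      rfl

-- ===== VERDICT (by name: the statement is the Claim_ definition above) =====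
theorem part2_spec : Claim_equal_part2 := by
  intro data g _ hpre
  exact part2_spec_aux data g hpre
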